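-- pv_equiv track=rewrite | github.com/dyusuf/RCAS_alpha | src/parse_anot.py | substract_parent_exon
-- ===== SOURCE A (Python) =====
-- def substract_parent_exon(child_ids):
--
--     # collect child_ids which are associate with identical exon_id
--     exon_features = {}
--     for child_id in child_ids:
--         if ":" in child_id:
--             exon_id = ":".join(child_id.split(":")[1:])
--
--             try:
--                 exon_features[exon_id].append(child_id)
--             except:
--                 exon_features[exon_id] = [child_id]
--
--     # collect exon_ids that are co-present with UTR and CDS
--     exon_set = []
--     for feature_ids in exon_features.values():
--         """ example of feature_ids
--         ['exon:ENST00000483335.1:3'],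
--         the case of no CDS or UTR documentation in reference
--         ['exon:ENST00000287078.6:2', 'CDS:ENST00000287078.6:2']
--         """
--
--         if len(feature_ids) > 1:
--             for child_id in feature_ids:
--                 feature = child_id.split(":")[0]
--                 if feature in ('exon'):
--                     exon_set.append(child_id)
--
--     child_ids = child_ids - set(exon_set)
--
--     return child_ids
-- ===== SOURCE B (Python) =====
-- def substract_parent_exon(child_ids):
--     # No grouping/counting structure at all: an exon child_id is dropped exactly
--     # when some OTHER element of the set carries the same exon id, found by a
--     # direct pairwise witness scan.
--     def exon_id(s):
--         return ":".join(s.split(":")[1:])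
--
--     return {c for c in child_ids
--             if not (":" in c
--                     and c.split(":")[0] in ("exon")
--                     and any(d != c and ":" in d and exon_id(d) == exon_id(c)
--                             for d in child_ids))}
-- ===== Notes on version B (the rewrite author's own statement) =====
-- stated objective: alternative
-- what changed: Drops A's grouping dict of child-id lists entirely: B decides each element independently by a direct pairwise scan for another set element with the same exon id (an existence witness instead of any grouping/counting structure), trading O(n) auxiliary state for an O(n^2) scan; the substring-style 'feature in ("exon")' test and the ':' guard are kept exactly.
import Mathlib
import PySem

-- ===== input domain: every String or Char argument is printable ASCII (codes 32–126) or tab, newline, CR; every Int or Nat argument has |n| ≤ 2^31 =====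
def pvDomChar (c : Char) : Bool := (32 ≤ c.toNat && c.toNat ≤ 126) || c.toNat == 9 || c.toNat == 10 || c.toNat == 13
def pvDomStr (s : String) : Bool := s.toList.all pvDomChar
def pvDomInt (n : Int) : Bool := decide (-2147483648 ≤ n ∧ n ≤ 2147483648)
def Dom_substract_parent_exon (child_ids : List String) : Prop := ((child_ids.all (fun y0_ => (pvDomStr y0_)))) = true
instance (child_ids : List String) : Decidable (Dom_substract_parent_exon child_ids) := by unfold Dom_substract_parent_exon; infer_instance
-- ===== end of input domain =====

-- B drops A's grouping dict of child-id lists entirely and decides each element independently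
-- by a direct pairwise scan for another set element with the same exon id (objective: alternative).
-- The input is a Python set (modelled as PySem.Set: its distinct elements); outputs compared as sets.

-- ===== PORT A =====
-- shared expression helpers (both Pythons compute these very expressions)
-- c.split(":"); split? is none only for sep = "", and the separator here is ":" — exact
def pvSplit (c : String) : List String := (PySem.Str.split? c ":").getD []
-- ":" in c
def pvHasColon (c : String) : Bool := PySem.Str.isIn ":" c
-- ":".join(c.split(":")[1:])
def pvKeyOf (c : String) : String := PySem.Str.join ":" (PySem.List.slice (pvSplit c) (some 1) none)
-- c.split(":")[0]; str.split always returns a non-empty list, so index 0 never raises — exact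
def pvFeatOf (c : String) : String := PySem.List.pyGetD (pvSplit c) 0 ""
-- feature in ("exon")  — Python substring test
def pvSubExon (c : String) : Bool := PySem.Str.isIn (pvFeatOf c) "exon"

-- first loop of A over the set's elements: try d[k].append(c) / except d[k] = [c]
def pvDictA (items : List String) : PySem.Dict String (List String) :=
  items.foldl
    (fun d c => if pvHasColon c then d.modify (pvKeyOf c) [] (fun v => v ++ [c]) else d)
    PySem.Dict.empty

-- second loop of A over the dict's values
def pvExonSet (items : List String) : List String :=
  (pvDictA items).values.foldl
    (fun acc v =>
      if 1 < v.length then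
        v.foldl (fun acc2 c => if pvSubExon c then acc2 ++ [c] else acc2) acc
      else acc) []

def substract_parent_exon (child_ids : List String) : List String :=
  let items := PySem.Set.ofList child_ids   -- the input set's distinct elements
  PySem.Set.diff items (PySem.Set.ofList (pvExonSet items))

-- ===== PORT B =====
-- {c for c in child_ids if not (":" in c and c.split(":")[0] in ("exon")
--     and any(d != c and ":" in d and exon_id(d) == exon_id(c) for d in child_ids))}
def substract_parent_exon_alt (child_ids : List String) : List String :=
  let items := PySem.Set.ofList child_ids   -- the input set's distinct elements
  items.filter (fun c =>
    !(pvHasColon c && pvSubExon c &&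
      items.any (fun d => !(d == c) && pvHasColon d && (pvKeyOf d == pvKeyOf c))))

-- ===== PRECONDITION & SPEC =====
def Spec_substract_parent_exon (child_ids : List String) (out : List String) : Prop := out = substract_parent_exon_alt child_ids
instance (child_ids : List String) (out : List String) : Decidable (Spec_substract_parent_exon child_ids out) := by unfold Spec_substract_parent_exon; infer_instance

-- ===== CLAIM (what is proved, stated in full; the proofs are below) =====
def Claim_equal_substract_parent_exon : Prop := ∀ (child_ids : List String), Dom_substract_parent_exon child_ids → Spec_substract_parent_exon child_ids (substract_parent_exon child_ids)

-- ===== LEMMAS AND PROOFS =====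

-- the elements with the same exon id k (among those containing ":")
def pvGroup (xs : List String) (k : String) : List String :=
  (xs.filter pvHasColon).filter (fun x => pvKeyOf x == k)

theorem pvDictA_getD (xs : List String) (k : String) :
    (pvDictA xs).getD k [] = pvGroup xs k := by
  unfold pvDictA pvGroup
  rw [PySem.List.foldl_if_eq_foldl_filter]
  have h := PySem.Dict.getD_foldl_modify_append
    ((xs.filter pvHasColon).map (fun c => (pvKeyOf c, c))) (PySem.Dict.empty (κ := String) (ν := List String)) k
  rw [List.foldl_map] at h
  simpa [List.filter_map, Function.comp_def] using h

theorem pvDictA_keys (xs : List String) :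
    (pvDictA xs).keys = PySem.Set.ofList ((xs.filter pvHasColon).map pvKeyOf) := by
  unfold pvDictA
  rw [PySem.List.foldl_if_eq_foldl_filter,
    PySem.Dict.keys_foldl_modify_key (xs.filter pvHasColon) pvKeyOf [] (fun _ c => fun v => v ++ [c])]
  rfl

theorem pvDictA_nodup (xs : List String) : (pvDictA xs).keys.Nodup := by
  unfold pvDictA
  rw [PySem.List.foldl_if_eq_foldl_filter]
  exact PySem.Dict.nodup_keys_foldl_modify_key _ pvKeyOf [] (fun _ c => fun v => v ++ [c]) _ (by simp)

theorem mem_pvGroup (xs : List String) (k c : String) :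
    c ∈ pvGroup xs k ↔ c ∈ xs ∧ pvHasColon c = true ∧ pvKeyOf c = k := by
  unfold pvGroup
  simp only [List.mem_filter, beq_iff_eq]
  constructor
  · rintro ⟨⟨h1, h2⟩, h3⟩; exact ⟨h1, h2, h3⟩
  · rintro ⟨h1, h2, h3⟩; exact ⟨⟨h1, h2⟩, h3⟩

theorem mem_pvExonSet (xs : List String) (c : String) :
    c ∈ pvExonSet xs ↔
      c ∈ xs ∧ pvHasColon c = true ∧ 1 < (pvGroup xs (pvKeyOf c)).length ∧ pvSubExon c = true := by
  unfold pvExonSet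
  have hrw := PySem.List.foldl_congr_mem
      (l := (pvDictA xs).values) (init := ([] : List String))
      (f := fun acc v => if 1 < v.length then
              v.foldl (fun acc2 c => if pvSubExon c then acc2 ++ [c] else acc2) acc
            else acc)
      (g := fun acc v => acc ++ (if 1 < v.length then v.filter pvSubExon else []))
      (by
        intro acc v _
        by_cases h : 1 < v.length
        · simp [h, PySem.List.foldl_append_if_eq_filter]
        · simp [h])
  rw [hrw, PySem.List.foldl_append_eq_flatMap]
  rw [PySem.Dict.values_eq_map_keys _ (pvDictA_nodup xs) [], pvDictA_keys]
  simp only [List.nil_append, List.mem_flatMap, List.mem_map]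
  constructor
  · rintro ⟨v, ⟨k, hk, rfl⟩, hcv⟩
    rw [pvDictA_getD] at hcv
    by_cases hlen : 1 < (pvGroup xs k).length
    · simp only [hlen, if_pos] at hcv
      rcases List.mem_filter.mp hcv with ⟨hg, hsub⟩
      rcases (mem_pvGroup xs k c).mp hg with ⟨hmem, hcol, hkey⟩
      exact ⟨hmem, hcol, by rw [hkey]; exact hlen, hsub⟩
    · simp [hlen] at hcv
  · rintro ⟨hmem, hcol, hlen, hsub⟩
    refine ⟨pvGroup xs (pvKeyOf c), ⟨pvKeyOf c, ?_, by rw [pvDictA_getD]⟩, ?_⟩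
    · rw [PySem.Set.mem_ofList]
      exact List.mem_map.mpr ⟨c, List.mem_filter.mpr ⟨hmem, hcol⟩, rfl⟩
    · simp only [hlen, if_pos]
      exact List.mem_filter.mpr ⟨(mem_pvGroup xs (pvKeyOf c) c).mpr ⟨hmem, hcol, rfl⟩, hsub⟩

-- on a duplicate-free list containing c, "more than one element" = "some element other than c"
theorem one_lt_length_iff_exists_ne {α : Type} [DecidableEq α] (l : List α) (c : α)
    (hnd : l.Nodup) (hc : c ∈ l) : 1 < l.length ↔ ∃ d ∈ l, d ≠ c := by
  constructor
  · intro hlen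
    by_contra hno
    push Not at hno
    rcases l with _ | ⟨a, _ | ⟨b, t⟩⟩
    · simp at hlen
    · simp at hlen
    · have ha : a = c := hno a (by simp)
      have hb : b = c := hno b (by simp)
      rcases List.nodup_cons.mp hnd with ⟨hab, _⟩
      exact hab (by simp [ha, hb])
  · rintro ⟨d, hd, hne⟩
    have hcd : c ∈ l.erase d := (List.mem_erase_of_ne hne.symm).mpr hc
    have : 0 < (l.erase d).length := List.length_pos_of_mem hcd
    have := List.length_erase_of_mem hd
    omega

-- the group of c inside a duplicate-free list is duplicate-free
theorem pvGroup_nodup (xs : List String) (k : String) (hnd : xs.Nodup) :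
    (pvGroup xs k).Nodup := ((hnd.filter _).filter _)

-- for c in a duplicate-free xs with ":" in c: a big group = a distinct same-key witness
theorem group_big_iff_witness (xs : List String) (c : String) (hnd : xs.Nodup)
    (hc : c ∈ xs) (hcol : pvHasColon c = true) :
    1 < (pvGroup xs (pvKeyOf c)).length ↔
      ∃ d ∈ xs, d ≠ c ∧ pvHasColon d = true ∧ pvKeyOf d = pvKeyOf c := by
  have hcg : c ∈ pvGroup xs (pvKeyOf c) := (mem_pvGroup xs _ c).mpr ⟨hc, hcol, rfl⟩
  rw [one_lt_length_iff_exists_ne _ c (pvGroup_nodup xs _ hnd) hcg]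
  constructor
  · rintro ⟨d, hd, hne⟩
    rcases (mem_pvGroup xs _ d).mp hd with ⟨h1, h2, h3⟩
    exact ⟨d, h1, hne, h2, h3⟩
  · rintro ⟨d, h1, hne, h2, h3⟩
    exact ⟨d, (mem_pvGroup xs _ d).mpr ⟨h1, h2, h3⟩, hne⟩

-- ===== VERDICT (by name: the statement is the Claim_ definition above) =====
theorem substract_parent_exon_spec : Claim_equal_substract_parent_exon := by
  unfold Claim_equal_substract_parent_exon
  intro xs _
  unfold Spec_substract_parent_exon substract_parent_exon substract_parent_exon_alt
  show List.filter _ _ = List.filter _ _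
  apply List.filter_congr
  intro c hc
  have hmem : c ∈ PySem.Set.ofList xs := hc
  have hnd : (PySem.Set.ofList xs).Nodup := PySem.Set.nodup_ofList xs
  congr 1
  rw [Bool.eq_iff_iff]
  simp only [PySem.Set.contains, List.contains_iff_mem, PySem.Set.mem_ofList (pvExonSet _),
    mem_pvExonSet, Bool.and_eq_true, List.any_eq_true, Bool.not_eq_eq_eq_not, Bool.not_true,
    ne_eq, beq_iff_eq, beq_eq_false_iff_ne]
  constructor
  · rintro ⟨_, hcol, hlen, hsub⟩
    rcases (group_big_iff_witness _ c hnd hmem hcol).mp hlen with ⟨d, hd, hne, hdc, hdk⟩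
    exact ⟨⟨hcol, hsub⟩, d, hd, ⟨hne, hdc⟩, hdk⟩
  · rintro ⟨⟨hcol, hsub⟩, d, hd, ⟨hne, hdc⟩, hdk⟩
    exact ⟨hmem, hcol, (group_big_iff_witness _ c hnd hmem hcol).mpr ⟨d, hd, hne, hdc, hdk⟩, hsub⟩
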